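-- pv_equiv track=rewrite | github.com/hpmarshall/SnowFusion | python/earthdata_credentials.py | _strip_machine_block
-- ===== SOURCE A (Python) =====
-- def _strip_machine_block(text: str, host: str) -> list[str]:
--     """Return lines of text with any existing 'machine <host>' block removed."""
--     output: list[str] = []
--     skip = False
--     for line in text.splitlines(keepends=True):
--         stripped = line.strip()
--         if stripped.startswith("machine"):
--             # Start of a new machine block — decide whether to skip it
--             skip = stripped.split()[1] == host if len(stripped.split()) > 1 else False
--         if not skip:
--             output.append(line)
--     return output
-- ===== SOURCE B (Python) =====
-- def _strip_machine_block(text: str, host: str) -> list[str]: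
--     """Return lines of text with any existing 'machine <host>' block removed.
--
--     Different decomposition: partition lines into blocks (a new block starts at
--     every line whose stripped form starts with 'machine'), then keep or drop each
--     whole block by inspecting only its header line, and concatenate kept blocks.
--     """
--     blocks: list[list[str]] = []
--     current: list[str] = []
--     for line in text.splitlines(keepends=True):
--         if line.strip().startswith("machine"):
--             blocks.append(current)
--             current = [line]
--         else:
--             current.append(line)
--     blocks.append(current)
--
--     def _keep(block: list[str]) -> bool:
--         if not block or not block[0].strip().startswith("machine"):
--             return True
--         tokens = block[0].strip().split()
--         return len(tokens) <= 1 or tokens[1] != host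
--
--     return [line for block in blocks if _keep(block) for line in block]
-- ===== Notes on version B (the rewrite author's own statement) =====
-- stated objective: alternative
-- what changed: Replaced A's single pass with a running skip flag by a two-phase block decomposition: partition the keepends lines into header-led blocks, decide keep/drop per block from its header line only, and concatenate the kept blocks.
import Mathlib
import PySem

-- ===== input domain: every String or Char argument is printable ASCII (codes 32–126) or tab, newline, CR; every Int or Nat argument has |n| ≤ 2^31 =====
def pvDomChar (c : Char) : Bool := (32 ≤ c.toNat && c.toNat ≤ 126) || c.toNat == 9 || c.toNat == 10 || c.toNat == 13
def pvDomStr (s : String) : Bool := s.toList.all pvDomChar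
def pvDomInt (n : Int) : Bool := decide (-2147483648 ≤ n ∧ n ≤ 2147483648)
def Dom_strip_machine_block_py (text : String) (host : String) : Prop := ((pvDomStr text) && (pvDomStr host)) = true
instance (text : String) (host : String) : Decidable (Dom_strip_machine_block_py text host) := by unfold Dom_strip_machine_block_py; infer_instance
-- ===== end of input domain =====

-- B partitions the lines into header-led blocks and filters whole blocks by their header,
-- instead of A's running skip flag; objective: alternative decomposition, same cost.


-- str.splitlines(keepends=True), hand-ported (PySem has only the keepends=False form);
-- exact on the ASCII domain, where the only line breaks are '\n', '\r' and '\r\n'.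
def pySplitKeep : List Char → List Char → List (List Char)
  | [], acc => if acc.isEmpty then [] else [acc.reverse]
  | '\r' :: '\n' :: rest, acc => (acc.reverse ++ ['\r', '\n']) :: pySplitKeep rest []
  | c :: rest, acc =>
    if c = '\n' ∨ c = '\r' then (acc.reverse ++ [c]) :: pySplitKeep rest []
    else pySplitKeep rest (c :: acc)
  termination_by l _ => l.length

-- ===== PORT A =====
-- one iteration of A's loop over (output, skip)
def stepA (hs : List Char) (st : List (List Char) × Bool) (line : List Char) :
    List (List Char) × Bool :=
  let stripped := PySem.Chars.strip line
  let skip :=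
    if PySem.Chars.startswith stripped "machine".toList then
      (if (PySem.Chars.split₀ stripped).length > 1 then
        ((PySem.Chars.split₀ stripped)[1]! == hs) else false)
    else st.2
  (if !skip then st.1 ++ [line] else st.1, skip)

def strip_machine_block_py (text : String) (host : String) : List String :=
  (((pySplitKeep text.toList []).foldl (stepA host.toList) ([], false)).1).map
    (fun cs => String.ofList cs)

-- ===== PORT B =====
-- one iteration of B's partition loop over (blocks, current)
def stepB (st : List (List (List Char)) × List (List Char)) (line : List Char) :
    List (List (List Char)) × List (List Char) :=
  if PySem.Chars.startswith (PySem.Chars.strip line) "machine".toList then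
    (st.1 ++ [st.2], [line])
  else
    (st.1, st.2 ++ [line])

-- B's _keep: decide a whole block from its header line
def keepB (hs : List Char) (block : List (List Char)) : Bool :=
  match block with
  | [] => true
  | h :: _ =>
    if PySem.Chars.startswith (PySem.Chars.strip h) "machine".toList then
      decide ((PySem.Chars.split₀ (PySem.Chars.strip h)).length ≤ 1)
        || !((PySem.Chars.split₀ (PySem.Chars.strip h))[1]! == hs)
    else true

def strip_machine_block_py_alt (text : String) (host : String) : List String :=
  let st := (pySplitKeep text.toList []).foldl stepB ([], [])
  ((((st.1 ++ [st.2]).filter (keepB host.toList)).flatten).map (fun cs => String.ofList cs))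

-- ===== PRECONDITION & SPEC =====
def Spec_strip_machine_block_py (text : String) (host : String) (out : List String) : Prop := out = strip_machine_block_py_alt text host
instance (text : String) (host : String) (out : List String) : Decidable (Spec_strip_machine_block_py text host out) := by unfold Spec_strip_machine_block_py; infer_instance

-- ===== CLAIM (what is proved, stated in full; the proofs are below) =====
def Claim_equal_strip_machine_block_py : Prop := ∀ (text : String) (host : String), Dom_strip_machine_block_py text host → Spec_strip_machine_block_py text host (strip_machine_block_py text host)

-- ===== LEMMAS AND PROOFS =====

-- proof-side abbreviation for A's skip assignment at a header line
def sCond (hs l : List Char) : Bool :=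
  if (PySem.Chars.split₀ (PySem.Chars.strip l)).length > 1 then
    ((PySem.Chars.split₀ (PySem.Chars.strip l))[1]! == hs) else false

theorem keepB_single (hs l : List Char)
    (h : PySem.Chars.startswith (PySem.Chars.strip l) "machine".toList = true) :
    keepB hs [l] = !(sCond hs l) := by
  simp only [keepB, sCond]
  rw [h]
  by_cases hlen : (PySem.Chars.split₀ (PySem.Chars.strip l)).length > 1
  · simp [hlen, show ¬((PySem.Chars.split₀ (PySem.Chars.strip l)).length ≤ 1) by omega]
  · simp [hlen, show (PySem.Chars.split₀ (PySem.Chars.strip l)).length ≤ 1 by omega]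

theorem keepB_append (hs : List Char) (cur : List (List Char)) (l : List Char)
    (h : PySem.Chars.startswith (PySem.Chars.strip l) "machine".toList = false) :
    keepB hs (cur ++ [l]) = keepB hs cur := by
  cases cur with
  | nil => simp only [List.nil_append, keepB]; rw [h]; simp
  | cons a t => rfl

theorem stepA_head (hs : List Char) (st : List (List Char) × Bool) (l : List Char)
    (h : PySem.Chars.startswith (PySem.Chars.strip l) "machine".toList = true) :
    stepA hs st l = (if !(sCond hs l) then st.1 ++ [l] else st.1, sCond hs l) := by
  simp only [stepA, sCond]
  rw [h]
  simp

theorem stepA_other (hs : List Char) (st : List (List Char) × Bool) (l : List Char)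
    (h : PySem.Chars.startswith (PySem.Chars.strip l) "machine".toList = false) :
    stepA hs st l = (if !st.2 then st.1 ++ [l] else st.1, st.2) := by
  simp only [stepA]
  rw [h]
  simp

theorem stepB_head (st : List (List (List Char)) × List (List Char)) (l : List Char)
    (h : PySem.Chars.startswith (PySem.Chars.strip l) "machine".toList = true) :
    stepB st l = (st.1 ++ [st.2], [l]) := by
  simp only [stepB]
  rw [h]
  simp

theorem stepB_other (st : List (List (List Char)) × List (List Char)) (l : List Char)
    (h : PySem.Chars.startswith (PySem.Chars.strip l) "machine".toList = false) :
    stepB st l = (st.1, st.2 ++ [l]) := by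
  simp only [stepB]
  rw [h]
  simp

theorem filter_flatten_snoc (hs : List Char) (bs : List (List (List Char)))
    (cur : List (List Char)) (skip : Bool) (hk : keepB hs cur = !skip) :
    (((bs ++ [cur]).filter (keepB hs)).flatten)
      = ((bs.filter (keepB hs)).flatten) ++ (if skip then [] else cur) := by
  cases skip <;> simp_all [List.filter_append]

theorem key (hs : List Char) : ∀ (lines : List (List Char))
    (bs : List (List (List Char))) (cur out : List (List Char)) (skip : Bool),
    keepB hs cur = !skip →
    out = ((bs.filter (keepB hs)).flatten) ++ (if skip then [] else cur) →
    (lines.foldl (stepA hs) (out, skip)).1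
      = ((((lines.foldl stepB (bs, cur)).1 ++ [(lines.foldl stepB (bs, cur)).2]).filter
            (keepB hs)).flatten) := by
  intro lines
  induction lines with
  | nil =>
    intro bs cur out skip hk hout
    simp only [List.foldl_nil]
    rw [filter_flatten_snoc hs bs cur skip hk, hout]
  | cons l rest ih =>
    intro bs cur out skip hk hout
    simp only [List.foldl_cons]
    by_cases hstart : PySem.Chars.startswith (PySem.Chars.strip l) "machine".toList = true
    · rw [stepA_head hs _ l hstart, stepB_head _ l hstart]
      apply ih
      · exact keepB_single hs l hstart
      · rw [filter_flatten_snoc hs bs cur skip hk, ← hout]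
        cases h2 : sCond hs l <;> simp
    · have hstart' : PySem.Chars.startswith (PySem.Chars.strip l) "machine".toList = false := by
        simpa using hstart
      rw [stepA_other hs _ l hstart', stepB_other _ l hstart']
      apply ih
      · rw [keepB_append hs cur l hstart', hk]
      · cases hskip : skip
        · subst hout; simp [hskip]
        · subst hout; simp [hskip]

-- ===== VERDICT (by name: the statement is the Claim_ definition above) =====
theorem strip_machine_block_py_spec : Claim_equal_strip_machine_block_py := by
  intro text host _
  unfold Spec_strip_machine_block_py strip_machine_block_py strip_machine_block_py_alt
  exact congrArg (List.map _) (key host.toList (pySplitKeep text.toList []) [] [] [] false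
    (by simp [keepB]) (by simp))
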